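-- pv_equiv track=rewrite | github.com/alirza13/Akari-Constraint-Satisfaction-Problem | CSP.py | blackInBetweenY
-- ===== SOURCE A (Python) =====
-- graph = [ ['Y', 'Y', 'Y', 'Y', 'X', 'Y', 'Y'],  # 7X7 Hard
--           ['Y', '2', 'Y', 'Y', 'Y', '0', 'Y'],
--           ['1', 'Y', 'Y', 'Y', 'Y', 'Y', 'Y'],
--           ['Y', 'Y', 'Y', '2', 'Y', 'Y', 'Y'],
--           ['Y', 'Y', 'Y', 'Y', 'Y', 'Y', '2'],
--           ['Y', '2', 'Y', 'Y', 'Y', '3', 'Y'],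
--           ['Y', 'Y', 'X', 'Y', 'Y', 'Y', 'Y']
--         ]
--
-- def blackInBetweenY (y):       # Check for sector in columns
--     sectors = []
--     startingPos = 0
--     x = 0
--     while x < len(graph):
--         if graph[x][y] != 'Y':
--             startingPos = startingPos + 1
--             x = x + 1
--         else:
--             break
--
--     while x < len(graph):
--         if graph[x][y] != 'Y':
--             sectors.append([startingPos,x - 1])
--             if x + 1 < len(graph) and graph[x + 1][y] == 'Y':
--                 startingPos = x + 1
--                 x = x + 1
--             else:
--                 while x < len(graph) and graph[x][y] != 'Y':
--                     x = x + 1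
--                 startingPos = x
--         elif x == len (graph) - 1 and graph[x][y] == 'Y':
--             sectors.append([startingPos,x])
--             break
--         else:
--             x = x + 1
--     return sectors
-- ===== SOURCE B (Python) =====
-- graph = [ ['Y', 'Y', 'Y', 'Y', 'X', 'Y', 'Y'],
--           ['Y', '2', 'Y', 'Y', 'Y', '0', 'Y'],
--           ['1', 'Y', 'Y', 'Y', 'Y', 'Y', 'Y'],
--           ['Y', 'Y', 'Y', '2', 'Y', 'Y', 'Y'],
--           ['Y', 'Y', 'Y', 'Y', 'Y', 'Y', '2'],
--           ['Y', '2', 'Y', 'Y', 'Y', '3', 'Y'],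
--           ['Y', 'Y', 'X', 'Y', 'Y', 'Y', 'Y']
--         ]
--
-- def blackInBetweenY(y):
--     ys = [i for i in range(len(graph)) if graph[i][y] == 'Y']
--     sectors = []
--     if not ys:
--         return sectors
--     start = prev = ys[0]
--     for i in ys[1:]:
--         if i != prev + 1:
--             sectors.append([start, prev])
--             start = i
--         prev = i
--     sectors.append([start, prev])
--     return sectors
-- ===== Notes on version B (the rewrite author's own statement) =====
-- stated objective: simpler
-- what changed: Replaces A's interleaved scan/emit state machine (two nested while loops with a skip-ahead inner loop) by a two-phase pass: first collect the list of row indices whose cell is 'Y', then group maximal runs of consecutive indices into inclusive [start,end] pairs.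
import Mathlib
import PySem

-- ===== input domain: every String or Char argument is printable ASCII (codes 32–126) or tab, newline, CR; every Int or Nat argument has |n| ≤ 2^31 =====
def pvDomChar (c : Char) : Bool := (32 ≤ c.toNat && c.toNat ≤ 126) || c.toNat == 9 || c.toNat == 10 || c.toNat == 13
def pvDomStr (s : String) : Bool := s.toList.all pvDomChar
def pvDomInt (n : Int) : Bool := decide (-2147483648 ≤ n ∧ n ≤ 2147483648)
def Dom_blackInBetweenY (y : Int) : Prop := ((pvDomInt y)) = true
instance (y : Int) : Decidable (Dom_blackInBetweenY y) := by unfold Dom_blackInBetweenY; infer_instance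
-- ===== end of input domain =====

-- B replaces A's interleaved scan/emit state machine with a two-phase pass
-- (collect 'Y' row indices, then group maximal consecutive runs); objective: simpler.

-- the module-level seven-by-seven grid (cells are single characters)
def pvRow0 : List Char := ['Y', 'Y', 'Y', 'Y', 'X', 'Y', 'Y']

def pvGraph : List (List Char) :=
  [ pvRow0,
    ['Y', '2', 'Y', 'Y', 'Y', '0', 'Y'],
    ['1', 'Y', 'Y', 'Y', 'Y', 'Y', 'Y'],
    ['Y', 'Y', 'Y', '2', 'Y', 'Y', 'Y'],
    ['Y', 'Y', 'Y', 'Y', 'Y', 'Y', '2'],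
    ['Y', '2', 'Y', 'Y', 'Y', '3', 'Y'],
    ['Y', 'Y', 'X', 'Y', 'Y', 'Y', 'Y'] ]

-- graph[x][y]; the default ' ' is never reached under Pre_ (y in range, x a valid row index)
def pvCell (x y : Int) : Char :=
  (PySem.List.pyGet? ((PySem.List.pyGet? pvGraph x).getD []) y).getD ' '

-- ===== PORT A =====
-- first while loop: skip leading non-'Y' cells, incrementing startingPos and x
def pvALoop1 (y : Int) : Nat → Int → Int → Int × Int
  | 0, s, x => (s, x)
  | f + 1, s, x =>
      if x < 7 then
        if pvCell x y ≠ 'Y' then pvALoop1 y f (s + 1) (x + 1) else (s, x)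
      else (s, x)

-- inner while loop of A: advance x past a block of non-'Y' cells
def pvAInner (y : Int) : Nat → Int → Int
  | 0, x => x
  | f + 1, x =>
      if x < 7 ∧ pvCell x y ≠ 'Y' then pvAInner y f (x + 1) else x

-- second while loop of A
def pvALoop2 (y : Int) : Nat → List (List Int) → Int → Int → List (List Int)
  | 0, secs, _, _ => secs
  | f + 1, secs, s, x =>
      if x < 7 then
        if pvCell x y ≠ 'Y' then
          let secs' := secs ++ [[s, x - 1]]
          if x + 1 < 7 ∧ pvCell (x + 1) y = 'Y' then
            pvALoop2 y f secs' (x + 1) (x + 1)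
          else
            let x' := pvAInner y f x
            pvALoop2 y f secs' x' x'
        else if x = 6 ∧ pvCell x y = 'Y' then
          secs ++ [[s, x]]
        else
          pvALoop2 y f secs s (x + 1)
      else secs

def blackInBetweenY (y : Int) : List (List Int) :=
  let (s, x) := pvALoop1 y 16 0 0
  pvALoop2 y 16 [] s x

-- ===== PORT B =====
def blackInBetweenY_alt (y : Int) : List (List Int) :=
  let ys : List Int :=
    (PySem.List.pyRange 0 7 1).filter (fun i => pvCell i y = 'Y')
  match ys with
  | [] => []
  | h :: t =>
      let (secs, start, prev) :=
        t.foldl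
          (fun (acc : List (List Int) × Int × Int) i =>
            let (secs, start, prev) := acc
            if i ≠ prev + 1 then (secs ++ [[start, prev]], i, i)
            else (secs, start, i))
          ([], h, h)
      secs ++ [[start, prev]]

-- ===== PRECONDITION & SPEC =====
-- Pre_ excludes exactly the column indices y that are out of range for the grid's rows
-- (all rows have the first row's length), on which the Python A raises IndexError.
def Pre_blackInBetweenY (y : Int) : Prop := (PySem.List.pyGet? pvRow0 y).isSome = true
instance (y : Int) : Decidable (Pre_blackInBetweenY y) := by
  unfold Pre_blackInBetweenY; infer_instance

def pvWitness_blackInBetweenY : Int := (0)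

def Spec_blackInBetweenY (y : Int) (out : List (List Int)) : Prop := out = blackInBetweenY_alt y
instance (y : Int) (out : List (List Int)) : Decidable (Spec_blackInBetweenY y out) := by
  unfold Spec_blackInBetweenY; infer_instance

-- ===== CLAIM (what is proved, stated in full; the proofs are below) =====
def Claim_equal_blackInBetweenY : Prop :=
  ∀ (y : Int), Dom_blackInBetweenY y → Pre_blackInBetweenY y →
    Spec_blackInBetweenY y (blackInBetweenY y)

-- ===== LEMMAS AND PROOFS =====

-- ===== VERDICT (by name: the statement is the Claim_ definition above) =====
theorem blackInBetweenY_spec : Claim_equal_blackInBetweenY := by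
  intro y _ hp
  unfold Pre_blackInBetweenY at hp
  have h1 : PySem.List.pyGet? pvRow0 y ≠ none :=
    Option.isSome_iff_ne_none.mp hp
  have h2 : PySem.Raise.InRange pvRow0.length y := by
    by_contra hc
    exact h1 ((PySem.List.pyGet?_eq_none_iff _ _).mpr hc)
  unfold PySem.Raise.InRange at h2
  simp only [show pvRow0.length = 7 from rfl] at h2
  have h1' : (-7 : Int) ≤ y := by omega
  have h2' : y < 7 := by omega
  unfold Spec_blackInBetweenY
  interval_cases y <;> decide
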